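-- pv_equiv track=rewrite | github.com/LunarCM/HGNNA | utils.py | get_edge2node_
-- ===== SOURCE A (Python) =====
-- def get_edge2node_(sessions):
--     edge2node_index = []
--     j = 0
--     for i, session in enumerate(sessions):
--         for item in session:
--             if item != 0:
--                 edge2node_index.append([i, j])
--                 j += 1
--     return edge2node_index
-- ===== SOURCE B (Python) =====
-- def get_edge2node_(sessions):
--     # Phase 1: per-session count of nonzero items.
--     counts = [sum(1 for item in session if item != 0) for session in sessions]
--     # Phase 2: generate pairs from counts with a running global offset.
--     edge2node_index = []
--     j = 0
--     for i, c in enumerate(counts):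
--         for k in range(c):
--             edge2node_index.append([i, j + k])
--         j += c
--     return edge2node_index
-- ===== Notes on version B (the rewrite author's own statement) =====
-- stated objective: alternative
-- what changed: Replaces A's single interleaved item scan with a two-phase structure: first a per-session count of nonzero items, then a generation pass over the counts that emits [i, j+k] for k in range(count) while advancing a global offset.
import Mathlib
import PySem

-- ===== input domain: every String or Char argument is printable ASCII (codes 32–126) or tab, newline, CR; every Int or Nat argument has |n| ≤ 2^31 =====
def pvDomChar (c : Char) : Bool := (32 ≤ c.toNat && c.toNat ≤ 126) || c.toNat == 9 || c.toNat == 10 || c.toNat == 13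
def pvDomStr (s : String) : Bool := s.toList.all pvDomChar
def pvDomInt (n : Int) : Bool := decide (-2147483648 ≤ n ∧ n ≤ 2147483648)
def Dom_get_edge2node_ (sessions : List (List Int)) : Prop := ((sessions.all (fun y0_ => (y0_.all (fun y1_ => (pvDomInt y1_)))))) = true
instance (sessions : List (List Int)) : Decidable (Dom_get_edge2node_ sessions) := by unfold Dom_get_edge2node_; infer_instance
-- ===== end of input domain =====

-- B replaces A's single interleaved scan with a count-then-generate two-phase pass; same cost, alternative structure.

-- ===== PORT A =====
-- inner loop of A: for item in session: if item != 0: append [i, j]; j += 1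
def pvAInner (i : Int) (st : List (List Int) × Int) (session : List Int) : List (List Int) × Int :=
  session.foldl (fun st item =>
    if item ≠ 0 then (st.1 ++ [[i, st.2]], st.2 + 1) else st) st

def get_edge2node_ (sessions : List (List Int)) : List (List Int) :=
  (((PySem.List.enumerate sessions).foldl
    (fun st p => pvAInner p.1 st p.2) ([], 0)).1)

-- ===== PORT B =====
-- phase 1: per-session counts of nonzero items
def pvCnt (session : List Int) : Int :=
  session.foldl (fun a item => if item ≠ 0 then a + 1 else a) 0

def pvCounts (sessions : List (List Int)) : List Int :=
  sessions.map pvCnt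

-- phase 2: generate pairs from the counts with a running global offset
def get_edge2node__alt (sessions : List (List Int)) : List (List Int) :=
  (((PySem.List.enumerate (pvCounts sessions)).foldl
    (fun st p =>
      (st.1 ++ (PySem.List.pyRange 0 p.2 1).map (fun k => [p.1, st.2 + k]), st.2 + p.2))
    ([], 0)).1)

-- ===== PRECONDITION & SPEC =====
def Spec_get_edge2node_ (sessions : List (List Int)) (out : List (List Int)) : Prop := out = get_edge2node__alt sessions
instance (sessions : List (List Int)) (out : List (List Int)) : Decidable (Spec_get_edge2node_ sessions out) := by unfold Spec_get_edge2node_; infer_instance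

-- ===== CLAIM (what is proved, stated in full; the proofs are below) =====
def Claim_equal_get_edge2node_ : Prop := ∀ (sessions : List (List Int)), Dom_get_edge2node_ sessions → Spec_get_edge2node_ sessions (get_edge2node_ sessions)

-- ===== LEMMAS AND PROOFS =====

lemma cnt_nonneg (session : List Int) : 0 ≤ pvCnt session := by
  unfold pvCnt
  suffices h : ∀ a : Int, 0 ≤ a →
      0 ≤ session.foldl (fun a item => if item ≠ 0 then a + 1 else a) a from h 0 le_rfl
  induction session with
  | nil => intro a ha; simpa using ha
  | cons x xs ih =>
      intro a ha
      simp only [List.foldl_cons]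
      apply ih
      split <;> omega

lemma cnt_cons_ne (x : Int) (xs : List Int) (hx : x ≠ 0) :
    pvCnt (x :: xs) = 1 + pvCnt xs := by
  simp only [pvCnt, List.foldl_cons, if_pos hx]
  have shift : ∀ (l : List Int) (a : Int),
      l.foldl (fun a item => if item ≠ 0 then a + 1 else a) a
        = a + l.foldl (fun a item => if item ≠ 0 then a + 1 else a) 0 := by
    intro l
    induction l with
    | nil => intro a; simp
    | cons y ys ihy =>
        intro a
        simp only [List.foldl_cons]
        rw [ihy, ihy (if y ≠ 0 then (0:Int) + 1 else 0)]
        split <;> omega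
  rw [shift xs (0 + 1)]
  omega

lemma range_shift (c j i : Int) (hc : 0 ≤ c) :
    (PySem.List.pyRange 0 (1 + c) 1).map (fun k => [i, j + k])
      = [i, j] :: (PySem.List.pyRange 0 c 1).map (fun k => [i, (j + 1) + k]) := by
  rw [PySem.List.pyRange_one_cons (by omega)]
  simp only [List.map_cons, add_zero]
  congr 1
  rw [PySem.List.pyRange_one, PySem.List.pyRange_one]
  have h : (1 + c - (0 + 1)).toNat = (c - 0).toNat := by omega
  rw [h]
  simp only [List.map_map]
  apply List.map_congr_left
  intro k _
  simp only [Function.comp_apply]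
  norm_num
  ring

-- A's inner loop on one session appends exactly B's generated block and advances j by the count
lemma inner_eq (i : Int) (session : List Int) (acc : List (List Int)) (j : Int) :
    pvAInner i (acc, j) session
      = (acc ++ (PySem.List.pyRange 0 (pvCnt session) 1).map (fun k => [i, j + k]),
         j + pvCnt session) := by
  induction session generalizing acc j with
  | nil => simp [pvAInner, pvCnt, PySem.List.pyRange]
  | cons x xs ih =>
      by_cases hx : x = 0
      · have h1 : pvAInner i (acc, j) (x :: xs) = pvAInner i (acc, j) xs := by
          simp [pvAInner, hx]
        have h2 : pvCnt (x :: xs) = pvCnt xs := by simp [pvCnt, hx]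
        rw [h1, ih, h2]
      · have h1 : pvAInner i (acc, j) (x :: xs) = pvAInner i (acc ++ [[i, j]], j + 1) xs := by
          simp [pvAInner, hx]
        rw [h1, ih, cnt_cons_ne x xs hx,
            range_shift (pvCnt xs) j i (cnt_nonneg xs)]
        refine Prod.ext ?_ (by simp; omega)
        simp [List.append_assoc]

-- the two outer folds coincide for any start index and state
lemma outer_eq (sessions : List (List Int)) (s : Int) (acc : List (List Int)) (j : Int) :
    (PySem.List.enumerate sessions s).foldl (fun st p => pvAInner p.1 st p.2) (acc, j)
      = (PySem.List.enumerate (sessions.map pvCnt) s).foldl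
          (fun st p =>
            (st.1 ++ (PySem.List.pyRange 0 p.2 1).map (fun k => [p.1, st.2 + k]), st.2 + p.2))
          (acc, j) := by
  induction sessions generalizing s acc j with
  | nil => simp [PySem.List.enumerate_nil]
  | cons session rest ih =>
      rw [List.map_cons, PySem.List.enumerate_cons, PySem.List.enumerate_cons]
      simp only [List.foldl_cons]
      rw [inner_eq s session acc j]
      exact ih (s + 1) _ _

-- ===== VERDICT (by name: the statement is the Claim_ definition above) =====
theorem get_edge2node__spec : Claim_equal_get_edge2node_ := by
  intro sessions _
  unfold Spec_get_edge2node_ get_edge2node_ get_edge2node__alt pvCounts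
  rw [outer_eq sessions 0 [] 0]
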